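-- pv_equiv track=rewrite | github.com/JuanDAT-3/ProyectoMD | Ejercicio3.py | es_superfila
-- ===== SOURCE A (Python) =====
-- def es_superfila(a, b):
--     # a es super-fila de b si a[k] >= b[k] para todo k y en algún k a[k] > b[k]
--     mayor = False
--     for x, y in zip(a, b):
--         if x < y:
--             return False
--         if x > y:
--             mayor = True
--     return mayor
-- ===== SOURCE B (Python) =====
-- def es_superfila(a, b):
--     # B: idiomatic two-predicate formulation over zip (all >= and some >)
--     return all(x >= y for x, y in zip(a, b)) and any(x > y for x, y in zip(a, b))
-- ===== Notes on version B (the rewrite author's own statement) =====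
-- stated objective: idiomatic
-- what changed: Replaced the single fused loop with a flag and early return by the standard all/any predicate formulation over zip.
import Mathlib
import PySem

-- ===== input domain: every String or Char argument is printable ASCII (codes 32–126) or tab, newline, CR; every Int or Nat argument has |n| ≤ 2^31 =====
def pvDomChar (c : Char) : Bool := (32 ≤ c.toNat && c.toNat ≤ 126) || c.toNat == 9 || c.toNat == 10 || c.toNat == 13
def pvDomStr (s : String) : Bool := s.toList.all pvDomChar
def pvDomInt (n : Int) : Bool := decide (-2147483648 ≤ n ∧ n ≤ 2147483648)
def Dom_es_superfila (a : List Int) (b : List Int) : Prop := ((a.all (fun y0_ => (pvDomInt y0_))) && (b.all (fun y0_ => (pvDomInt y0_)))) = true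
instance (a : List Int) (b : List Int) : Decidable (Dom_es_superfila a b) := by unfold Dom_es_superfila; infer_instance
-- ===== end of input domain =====

-- B replaces A's fused flag-and-early-exit loop by the idiomatic all/any predicate pair over zip.

-- ===== PORT A =====
-- A's single loop over zip(a,b) carrying the 'mayor' flag, with early return on x < y.
def es_superfila_loop : List (Int × Int) → Bool → Bool
  | [], mayor => mayor
  | (x, y) :: rest, mayor =>
    if x < y then false
    else es_superfila_loop rest (if x > y then true else mayor)

def es_superfila (a : List Int) (b : List Int) : Bool :=
  es_superfila_loop (a.zip b) false

-- ===== PORT B =====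
def es_superfila_alt (a : List Int) (b : List Int) : Bool :=
  ((a.zip b).all (fun p => decide (p.1 ≥ p.2))) && ((a.zip b).any (fun p => decide (p.1 > p.2)))

-- ===== PRECONDITION & SPEC =====
def Spec_es_superfila (a : List Int) (b : List Int) (out : Bool) : Prop := out = es_superfila_alt a b
instance (a : List Int) (b : List Int) (out : Bool) : Decidable (Spec_es_superfila a b out) := by unfold Spec_es_superfila; infer_instance

-- ===== CLAIM (what is proved, stated in full; the proofs are below) =====
def Claim_equal_es_superfila : Prop := ∀ (a : List Int) (b : List Int), Dom_es_superfila a b → Spec_es_superfila a b (es_superfila a b)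

-- ===== LEMMAS AND PROOFS =====
theorem es_superfila_loop_eq (l : List (Int × Int)) (m : Bool) :
    es_superfila_loop l m
      = ((l.all (fun p => decide (p.1 ≥ p.2))) && (m || l.any (fun p => decide (p.1 > p.2)))) := by
  induction l generalizing m with
  | nil => simp [es_superfila_loop]
  | cons p rest ih =>
    obtain ⟨x, y⟩ := p
    simp only [es_superfila_loop, List.all_cons, List.any_cons]
    by_cases hlt : x < y
    · simp [hlt, not_le.mpr hlt]
    · have hge : y ≤ x := not_lt.mp hlt
      rw [if_neg hlt, ih]
      by_cases hgt : x > y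
      · simp [hgt, hge]
      · cases m <;> simp [hgt, hge]

-- ===== VERDICT (by name: the statement is the Claim_ definition above) =====
theorem es_superfila_spec : Claim_equal_es_superfila := by
  intro a b _
  unfold Spec_es_superfila es_superfila es_superfila_alt
  rw [es_superfila_loop_eq]
  simp
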